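-- pv_equiv track=rewrite | github.com/YungTitos/Dark-TV-series-Interactive-Event-Visualization | Visualization/DataManipulation.py | contains_death_event
-- ===== SOURCE A (Python) =====
-- def contains_death_event(text):
--     if not isinstance(text, str):
--         return False
--
--     death_terms = ["dies", "died", "killed", "kills", "murdered", "suicide", "death",
--                     "fatal", "passed away", "deceased", "dead"]
--
--     for term in death_terms:
--         if term in text.lower():
--             return True
--     return False
-- ===== SOURCE B (Python) =====
-- _DEATH_TERMS = frozenset(["dies", "died", "killed", "kills", "murdered", "suicide",
--                           "death", "fatal", "passed away", "deceased", "dead"])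
-- _TERM_LENGTHS = frozenset(len(t) for t in _DEATH_TERMS)
--
-- def contains_death_event(text):
--     if not isinstance(text, str):
--         return False
--     t = text.lower()
--     # single left-to-right pass: at each position, look up each fixed-length
--     # window in the hash set of terms (Rabin-Karp-style multi-pattern search,
--     # no per-term substring scans)
--     for i in range(len(t)):
--         for L in _TERM_LENGTHS:
--             if t[i:i + L] in _DEATH_TERMS:
--                 return True
--     return False
-- ===== Notes on version B (the rewrite author's own statement) =====
-- stated objective: alternative
-- what changed: Instead of A's k separate substring scans (one per term), B makes a single left-to-right pass over the lowered text, checking at each position the fixed-length windows (one per distinct term length) by hash-set lookup, so the per-term scan loop disappears.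
import Mathlib
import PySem

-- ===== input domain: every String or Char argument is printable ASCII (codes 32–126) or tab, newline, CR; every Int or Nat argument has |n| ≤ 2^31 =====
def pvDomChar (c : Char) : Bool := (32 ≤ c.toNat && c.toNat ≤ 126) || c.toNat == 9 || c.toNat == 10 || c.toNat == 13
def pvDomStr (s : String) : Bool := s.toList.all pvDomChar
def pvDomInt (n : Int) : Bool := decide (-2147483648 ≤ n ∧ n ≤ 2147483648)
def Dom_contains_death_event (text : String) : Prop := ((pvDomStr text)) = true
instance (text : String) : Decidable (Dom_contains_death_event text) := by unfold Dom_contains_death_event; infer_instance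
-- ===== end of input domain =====

-- ===== PORT A =====
-- B replaces A's per-term substring scans with one pass over the lowered text that looks up
-- fixed-length windows in a set of terms (alternative decomposition, similar cost).
-- The `isinstance(text, str)` guard is vacuous under the Lean typing (text : String) and has no port.
def deathTerms : List String :=
  ["dies", "died", "killed", "kills", "murdered", "suicide", "death",
   "fatal", "passed away", "deceased", "dead"]

-- the `for term in death_terms: if term in text.lower(): return True` loop
def cdeLoopA (text : String) : List String → Bool
  | [] => false
  | t :: rest => if PySem.Str.isIn t (PySem.Str.lower text) then true else cdeLoopA text rest

def contains_death_event (text : String) : Bool := cdeLoopA text deathTerms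

-- ===== PORT B =====
-- the frozenset of terms (as char lists) and the frozenset of their distinct lengths
def cdeTermSet : PySem.Set (List Char) := PySem.Set.ofList (deathTerms.map String.toList)
def cdeLenSet : PySem.Set Nat := PySem.Set.ofList (deathTerms.map (fun t => t.toList.length))

-- the `for i in range(len(t)): for L in lengths: if t[i:i+L] in terms: return True` pass,
-- as structural recursion over the successive suffixes of the lowered text
def cdeScanB : List Char → Bool
  | [] => false
  | c :: rest =>
      cdeLenSet.any (fun L => PySem.Set.contains cdeTermSet ((c :: rest).take L))
        || cdeScanB rest

def contains_death_event_alt (text : String) : Bool :=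
  cdeScanB (PySem.Chars.lower text.toList)

-- ===== PRECONDITION & SPEC =====
def Spec_contains_death_event (text : String) (out : Bool) : Prop := out = contains_death_event_alt text
instance (text : String) (out : Bool) : Decidable (Spec_contains_death_event text out) := by unfold Spec_contains_death_event; infer_instance

-- ===== CLAIM (what is proved, stated in full; the proofs are below) =====
def Claim_equal_contains_death_event : Prop := ∀ (text : String), Dom_contains_death_event text → Spec_contains_death_event text (contains_death_event text)

-- ===== LEMMAS AND PROOFS =====
-- at one position, "some fixed-length window is in the term set" ↔ "some term is a prefix here"
theorem cdeWindow_iff (s : List Char) :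
    (cdeLenSet.any (fun L => PySem.Set.contains cdeTermSet (s.take L)) = true)
      ↔ ∃ t ∈ cdeTermSet, t <+: s := by
  simp only [List.any_eq_true]
  constructor
  · rintro ⟨L, _, hc⟩
    exact ⟨s.take L, by simpa [PySem.Set.contains] using hc, List.take_prefix L s⟩
  · rintro ⟨t, ht, hp⟩
    refine ⟨t.length, ?_, ?_⟩
    · have : ∀ u ∈ cdeTermSet, u.length ∈ cdeLenSet := by decide
      exact this t ht
    · have := List.prefix_iff_eq_take.mp hp
      simpa [PySem.Set.contains, ← this] using ht

theorem cdeScanB_iff (s : List Char) :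
    cdeScanB s = true ↔ ∃ t ∈ cdeTermSet, ∃ n, t <+: s.drop n := by
  induction s with
  | nil =>
    simp only [cdeScanB]
    constructor
    · intro h; cases h
    · rintro ⟨t, ht, n, hp⟩
      have ht0 : t = [] := List.prefix_nil.mp (by simpa using hp)
      subst ht0
      revert ht; decide
  | cons c rest ih =>
    simp only [cdeScanB, Bool.or_eq_true, ih, cdeWindow_iff]
    constructor
    · rintro (⟨t, ht, hp⟩ | ⟨t, ht, n, hp⟩)
      · exact ⟨t, ht, 0, by simpa using hp⟩
      · exact ⟨t, ht, n + 1, by simpa using hp⟩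
    · rintro ⟨t, ht, n, hp⟩
      cases n with
      | zero => exact Or.inl ⟨t, ht, by simpa using hp⟩
      | succ m => exact Or.inr ⟨t, ht, m, by simpa using hp⟩

theorem cdeLoopA_iff (text : String) (ts : List String) :
    cdeLoopA text ts = true ↔ ∃ t ∈ ts, PySem.Str.isIn t (PySem.Str.lower text) = true := by
  induction ts with
  | nil => simp [cdeLoopA]
  | cons t rest ih =>
    by_cases h : PySem.Str.isIn t (PySem.Str.lower text) = true
    · simp only [cdeLoopA, if_pos h]
      exact iff_of_true trivial ⟨t, List.mem_cons_self, h⟩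
    · simp only [cdeLoopA, if_neg h, ih]
      constructor
      · rintro ⟨u, hu, hiu⟩; exact ⟨u, List.mem_cons_of_mem _ hu, hiu⟩
      · rintro ⟨u, hu, hiu⟩
        rcases List.mem_cons.mp hu with rfl | hu'
        · exact absurd hiu h
        · exact ⟨u, hu', hiu⟩

-- ===== VERDICT (by name: the statement is the Claim_ definition above) =====
theorem contains_death_event_spec : Claim_equal_contains_death_event := by
  intro text _
  unfold Spec_contains_death_event
  unfold contains_death_event contains_death_event_alt
  rw [Bool.eq_iff_iff, cdeLoopA_iff, cdeScanB_iff]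
  constructor
  · rintro ⟨t, ht, hin⟩
    refine ⟨t.toList, ?_, ?_⟩
    · simp [cdeTermSet, PySem.Set.mem_ofList]
      exact ⟨t, ht, rfl⟩
    · rw [PySem.Chars.exists_prefix_drop_iff_isIn]
      simpa [PySem.Str.isIn, PySem.Str.toList_lower] using hin
  · rintro ⟨tl, htl, hp⟩
    have : ∃ t ∈ deathTerms, t.toList = tl := by
      simpa [cdeTermSet, PySem.Set.mem_ofList] using htl
    obtain ⟨t, ht, rfl⟩ := this
    refine ⟨t, ht, ?_⟩
    rw [PySem.Chars.exists_prefix_drop_iff_isIn] at hp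
    simpa [PySem.Str.isIn, PySem.Str.toList_lower] using hp
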